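-- pv_equiv track=rewrite | github.com/tkgsn/priv_traj_gen | evaluation.py | compute_global_counts_from_time_label
-- ===== SOURCE A (Python) =====
-- from collections import Counter
--
-- def compute_global_counts_from_time_label(trajs, time_label_trajs, time_label):
--     # find the locations at time
--     def locations_at_time(traj, time_label_traj, time_label):
--         # if time_label in time_label_traj, return the locations at time
--         # else, return the final location of the index that is the closest to the time_label
--         assert time_label >= 1, "time_label should be larger than 1 because 0 is the start signal"
--         if time_label in time_label_traj:
--             indice = [i for i, t in enumerate(time_label_traj) if t == time_label]
--             return [traj[i] for i in indice]
--         else: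
--             indice = [i for i, t in enumerate(time_label_traj) if t <= time_label]
--             if len(indice) == 0:
--                 return []
--             else:
--                 return [[traj[i] for i in indice][-1]]
--
--     locations = []
--     for traj, time_label_traj in zip(trajs, time_label_trajs):
--         locations.extend(locations_at_time(traj, time_label_traj, time_label))
--
--     location_count = Counter(locations)
--
--     return location_count
-- ===== SOURCE B (Python) =====
-- from collections import Counter
--
-- def compute_global_counts_from_time_label(trajs, time_label_trajs, time_label):
--     # back-to-front scan over zipped (location, time) value pairs -- no indices anywhere:
--     # matches are collected in reverse, the fallback is the FIRST pair seen (in reverse)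
--     # with t <= time_label, i.e. the last one overall; the Counter is grown per trajectory.
--     counts = Counter()
--     for traj, time_label_traj in zip(trajs, time_label_trajs):
--         assert time_label >= 1, "time_label should be larger than 1 because 0 is the start signal"
--         matches_rev = []
--         fallback = None
--         for loc, t in reversed(list(zip(traj, time_label_traj))):
--             if t == time_label:
--                 matches_rev.append(loc)
--             if fallback is None and t <= time_label:
--                 fallback = loc
--         if matches_rev:
--             counts.update(reversed(matches_rev))
--         elif fallback is not None:
--             counts[fallback] += 1
--     return counts
-- ===== Notes on version B (the rewrite author's own statement) =====
-- stated objective: alternative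
-- what changed: A enumerates indices, builds index lists via a membership test plus filtering comprehensions and then indexes back into traj; B never computes an index: it zips locations with times and scans the pairs back-to-front once, collecting matches in reverse and taking the first t<=time_label pair seen (i.e. the last overall) as an Optional fallback, growing the Counter per trajectory instead of counting one concatenated list.
import Mathlib
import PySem

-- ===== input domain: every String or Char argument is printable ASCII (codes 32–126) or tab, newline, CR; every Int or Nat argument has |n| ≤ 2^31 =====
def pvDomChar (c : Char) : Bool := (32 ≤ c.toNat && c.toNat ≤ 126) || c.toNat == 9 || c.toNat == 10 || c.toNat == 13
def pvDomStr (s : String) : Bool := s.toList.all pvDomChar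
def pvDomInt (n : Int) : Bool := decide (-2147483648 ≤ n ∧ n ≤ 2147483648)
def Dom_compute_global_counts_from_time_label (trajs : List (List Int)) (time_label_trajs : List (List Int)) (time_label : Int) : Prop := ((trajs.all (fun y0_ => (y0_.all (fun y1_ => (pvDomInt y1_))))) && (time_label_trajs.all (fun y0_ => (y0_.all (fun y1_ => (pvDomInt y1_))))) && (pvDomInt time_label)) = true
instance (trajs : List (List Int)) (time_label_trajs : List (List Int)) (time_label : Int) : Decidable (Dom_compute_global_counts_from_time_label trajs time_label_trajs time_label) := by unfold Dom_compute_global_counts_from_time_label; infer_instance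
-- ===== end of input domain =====

-- B replaces A's index machinery (enumerate, index lists, traj[i], [-1]) by one back-to-front
-- scan over the zipped (location, time) pairs with an Option fallback (objective: alternative).

-- ===== PORT A =====
-- helper: A's locations_at_time (membership test, filtering comprehensions over enumerate, indexing)
def pvLocA (traj : List Int) (tl : List Int) (time_label : Int) : List Int :=
  if time_label ∈ tl then
    let indice := ((PySem.List.enumerate tl).filter (fun p => p.2 == time_label)).map (fun p => p.1)
    indice.map (fun i => PySem.List.pyGetD traj i 0)
  else
    let indice := ((PySem.List.enumerate tl).filter (fun p => decide (p.2 ≤ time_label))).map (fun p => p.1)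
    if indice.length = 0 then []
    else [PySem.List.pyGetD (indice.map (fun i => PySem.List.pyGetD traj i 0)) (-1) 0]

def compute_global_counts_from_time_label (trajs : List (List Int)) (time_label_trajs : List (List Int)) (time_label : Int) : List (Int × Int) :=
  let locations := (trajs.zip time_label_trajs).foldl (fun acc p => acc ++ pvLocA p.1 p.2 time_label) []
  (PySem.Dict.counter locations).items

-- ===== PORT B =====
-- helper: B's inner reverse loop over zip(traj, tl): matches collected in reverse + Option fallback
def pvSelB (pairs : List (Int × Int)) (time_label : Int) : List Int × Option Int :=
  pairs.reverse.foldl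
    (fun (st : List Int × Option Int) p =>
      (if p.2 == time_label then st.1 ++ [p.1] else st.1,
       if st.2 = none ∧ p.2 ≤ time_label then some p.1 else st.2))
    ([], none)

def compute_global_counts_from_time_label_alt (trajs : List (List Int)) (time_label_trajs : List (List Int)) (time_label : Int) : List (Int × Int) :=
  ((trajs.zip time_label_trajs).foldl
    (fun d p =>
      let st := pvSelB (p.1.zip p.2) time_label
      if st.1 ≠ [] then st.1.reverse.foldl (fun d x => d.modify x 0 (· + 1)) d
      else match st.2 with
           | some loc => d.modify loc 0 (· + 1)
           | none => d)
    PySem.Dict.empty).items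

-- ===== PRECONDITION & SPEC =====
-- Pre_ excludes exactly the inputs where Python A raises: the assert failure (time_label < 1 with a
-- nonempty zip) and the IndexErrors traj[i] for an index i that A's comprehensions actually access.
def Pre_compute_global_counts_from_time_label (trajs : List (List Int)) (time_label_trajs : List (List Int)) (time_label : Int) : Prop :=
  (trajs = [] ∨ time_label_trajs = [] ∨ 1 ≤ time_label) ∧
  ∀ p ∈ trajs.zip time_label_trajs,
    if time_label ∈ p.2 then
      ∀ i < p.2.length, p.2[i]! = time_label → i < p.1.length
    else
      ∀ i < p.2.length, p.2[i]! ≤ time_label → i < p.1.length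
instance (trajs : List (List Int)) (time_label_trajs : List (List Int)) (time_label : Int) : Decidable (Pre_compute_global_counts_from_time_label trajs time_label_trajs time_label) := by unfold Pre_compute_global_counts_from_time_label; infer_instance
def pvWitness_compute_global_counts_from_time_label : List (List Int) × List (List Int) × Int := ([[7, 8]], [[1, 2]], 1)

def Spec_compute_global_counts_from_time_label (trajs : List (List Int)) (time_label_trajs : List (List Int)) (time_label : Int) (out : List (Int × Int)) : Prop := out = compute_global_counts_from_time_label_alt trajs time_label_trajs time_label
instance (trajs : List (List Int)) (time_label_trajs : List (List Int)) (time_label : Int) (out : List (Int × Int)) : Decidable (Spec_compute_global_counts_from_time_label trajs time_label_trajs time_label out) := by unfold Spec_compute_global_counts_from_time_label; infer_instance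

-- ===== CLAIM (what is proved, stated in full; the proofs are below) =====
def Claim_equal_compute_global_counts_from_time_label : Prop := ∀ (trajs : List (List Int)) (time_label_trajs : List (List Int)) (time_label : Int), Dom_compute_global_counts_from_time_label trajs time_label_trajs time_label → Pre_compute_global_counts_from_time_label trajs time_label_trajs time_label → Spec_compute_global_counts_from_time_label trajs time_label_trajs time_label (compute_global_counts_from_time_label trajs time_label_trajs time_label)

-- ===== LEMMAS AND PROOFS =====

-- B's per-trajectory selected locations, as a list (proof helper, not part of either port)
def pvLocB (traj : List Int) (tl : List Int) (time_label : Int) : List Int :=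
  let st := pvSelB (traj.zip tl) time_label
  if st.1 ≠ [] then st.1.reverse
  else match st.2 with
       | some loc => [loc]
       | none => []

-- 'set the accumulator at the first passing element' keeps a some unchanged
theorem pvFoldlFirstSome {A B : Type} (p : A → Prop) [DecidablePred p] (f : A → B) (l : List A) (v : B) :
    l.foldl (fun a x => if a = none ∧ p x then some (f x) else a) (some v) = some v := by
  induction l with
  | nil => rfl
  | cons x xs ih => simpa using ih

-- a 'set at the first passing element' loop from none is head? of the filtered, mapped list
theorem pvFoldlFirst {A B : Type} (p : A → Prop) [DecidablePred p] (f : A → B) (l : List A) :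
    l.foldl (fun a x => if a = none ∧ p x then some (f x) else a) none
      = ((l.filter (fun x => decide (p x))).map f).head? := by
  induction l with
  | nil => rfl
  | cons x xs ih =>
    simp only [List.foldl_cons, List.filter_cons]
    by_cases h : p x
    · simp [h, pvFoldlFirstSome]
    · simpa [h] using ih

-- the bridge: under the in-range hypothesis, A's enumerate/index selection equals
-- the zip selection; stated with an arbitrary already-consumed prefix 'pre'
theorem pvBridge (P : Int → Bool) :
    ∀ (tl pre traj : List Int),
      (∀ (i : Nat) (hi : i < tl.length), P tl[i] → i < traj.length) →
      ((PySem.List.enumerate tl (pre.length : Int)).filter (fun p => P p.2)).map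
          (fun p => PySem.List.pyGetD (pre ++ traj) p.1 0)
        = ((traj.zip tl).filter (fun p => P p.2)).map (fun p => p.1) := by
  intro tl
  induction tl with
  | nil => intro pre traj h; simp [PySem.List.enumerate]
  | cons t tl' ih =>
    intro pre traj h
    cases traj with
    | nil =>
      have hall : ∀ q ∈ PySem.List.enumerate (t :: tl') (pre.length : Int), ¬ (P q.2 = true) := by
        intro q hq hPq
        obtain ⟨k, hk, rfl⟩ := (PySem.List.mem_enumerate_iff _ _ _).mp hq
        exact absurd (h k hk hPq) (by simp)
      rw [List.filter_eq_nil_iff.mpr (by intro q hq; simpa using hall q hq)]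
      simp
    | cons x traj' =>
      rw [PySem.List.enumerate_cons]
      simp only [List.zip_cons_cons]
      have htail :
          ((PySem.List.enumerate tl' ((pre.length : Int) + 1)).filter (fun p => P p.2)).map
              (fun p => PySem.List.pyGetD (pre ++ x :: traj') p.1 0)
            = ((traj'.zip tl').filter (fun p => P p.2)).map (fun p => p.1) := by
        have h' : ∀ (i : Nat) (hi : i < tl'.length), P tl'[i] → i < traj'.length := by
          intro i hi hPi
          have h2 := h (i + 1) (by simpa using Nat.succ_lt_succ hi) (by simpa using hPi)
          simp at h2
          omega
        have hpre : ((pre ++ [x]).length : Int) = (pre.length : Int) + 1 := by simp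
        have happ : (pre ++ [x]) ++ traj' = pre ++ x :: traj' := by simp
        rw [← hpre, ← happ]
        exact ih (pre ++ [x]) traj' h'
      by_cases hPt : P t
      · rw [List.filter_cons_of_pos (by simpa using hPt),
            List.filter_cons_of_pos (by simpa using hPt)]
        have hx : PySem.List.pyGetD (pre ++ x :: traj') (pre.length : Int) 0 = x := by
          rw [PySem.List.pyGetD_natCast]
          simp [List.getD_eq_getElem?_getD]
        simp only [List.map_cons, hx, htail]
      · rw [List.filter_cons_of_neg (by simpa using hPt),
            List.filter_cons_of_neg (by simpa using hPt)]
        exact htail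

-- per-pair equality of the two selections, under Pre_'s per-pair condition
theorem pvLoc_eq (traj tl : List Int) (L : Int)
    (h : if L ∈ tl then ∀ i < tl.length, tl[i]! = L → i < traj.length
         else ∀ i < tl.length, tl[i]! ≤ L → i < traj.length) :
    pvLocB traj tl L = pvLocA traj tl L := by
  have hsel : pvSelB (traj.zip tl) L =
      ((((traj.zip tl).filter (fun p => p.2 == L)).map (fun p => p.1)).reverse,
       ((((traj.zip tl).filter (fun p => decide (p.2 ≤ L))).map (fun p => p.1)).getLast?)) := by
    unfold pvSelB
    rw [PySem.List.foldl_prod_mk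
          (f := fun acc (p : Int × Int) => if p.2 == L then acc ++ [p.1] else acc)
          (g := fun (a : Option Int) (p : Int × Int) =>
            if a = none ∧ p.2 ≤ L then some p.1 else a)]
    rw [PySem.List.foldl_append_if (p := fun (p : Int × Int) => p.2 == L)
          (f := fun (p : Int × Int) => p.1)]
    rw [pvFoldlFirst (p := fun (p : Int × Int) => p.2 ≤ L) (f := fun (p : Int × Int) => p.1)]
    simp [List.filter_reverse, List.map_reverse, List.head?_reverse]
  unfold pvLocB pvLocA
  rw [hsel]
  by_cases hmem : L ∈ tl
  · -- equality branch
    have hb := pvBridge (fun t => t == L) tl [] traj (by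
      intro i hi hPi
      exact (if_pos hmem ▸ h) i hi (by rw [getElem!_pos tl i hi]; simpa using hPi))
    simp only [List.length_nil, Nat.cast_zero, List.nil_append] at hb
    have hmap : ((((PySem.List.enumerate tl).filter (fun p => p.2 == L)).map (fun p => p.1)).map
        (fun i => PySem.List.pyGetD traj i 0))
        = ((traj.zip tl).filter (fun p => p.2 == L)).map (fun p => p.1) := by
      rw [List.map_map]; exact hb
    obtain ⟨i, hi, hti⟩ := List.mem_iff_getElem.mp hmem
    have hir : i < traj.length := (if_pos hmem ▸ h) i hi (by rw [getElem!_pos tl i hi]; exact hti)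
    have hmemzip : (traj[i], L) ∈ traj.zip tl := by
      rw [← hti]
      exact List.mem_iff_getElem.mpr ⟨i, by simpa using ⟨hir, hi⟩, by simp⟩
    have hMne : ((traj.zip tl).filter (fun p => p.2 == L)).map (fun p => p.1) ≠ [] := by
      simp only [ne_eq, List.map_eq_nil_iff, List.filter_eq_nil_iff, not_forall]
      exact ⟨(traj[i], L), hmemzip, by simp⟩
    simp only [hmem, if_pos, ne_eq, List.reverse_eq_nil_iff, hMne, not_false_eq_true,
      List.reverse_reverse]
    exact hmap.symm
  · -- no-equality branch
    have hzero : ((traj.zip tl).filter (fun p => p.2 == L)).map (fun p => p.1) = [] := by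
      simp only [List.map_eq_nil_iff, List.filter_eq_nil_iff]
      intro p hp hbeq
      exact hmem (by
        have h2 : p.2 = L := by simpa using hbeq
        exact h2 ▸ (List.of_mem_zip hp).2)
    have hb := pvBridge (fun t => decide (t ≤ L)) tl [] traj (by
      intro i hi hPi
      exact (if_neg hmem ▸ h) i hi (by rw [getElem!_pos tl i hi]; simpa using hPi))
    simp only [List.length_nil, Nat.cast_zero, List.nil_append] at hb
    have hmap : ((((PySem.List.enumerate tl).filter (fun p => decide (p.2 ≤ L))).map (fun p => p.1)).map
        (fun i => PySem.List.pyGetD traj i 0))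
        = ((traj.zip tl).filter (fun p => decide (p.2 ≤ L))).map (fun p => p.1) := by
      rw [List.map_map]; exact hb
    simp only [hzero, List.reverse_nil, ne_eq, not_true_eq_false, if_false, hmem]
    by_cases hFnil : ((traj.zip tl).filter (fun p => decide (p.2 ≤ L))).map (fun p => p.1) = []
    · have hE : (((PySem.List.enumerate tl).filter (fun p => decide (p.2 ≤ L))).map
          (fun p : Int × Int => p.1)).length = 0 := by
        have hl := congrArg List.length hmap
        rw [List.length_map, hFnil] at hl
        simpa using hl
      simp [hFnil, hE]
    · have hlen : ¬ (((PySem.List.enumerate tl).filter (fun p => decide (p.2 ≤ L))).map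
          (fun p : Int × Int => p.1)).length = 0 := by
        intro h0
        apply hFnil
        have hl := congrArg List.length hmap
        rw [List.length_map, h0] at hl
        exact List.eq_nil_of_length_eq_zero hl.symm
      have hbne : ((((PySem.List.enumerate tl).filter (fun p => decide (p.2 ≤ L))).map
          (fun p : Int × Int => p.1)).map (fun i => PySem.List.pyGetD traj i 0)) ≠ [] := by
        rw [hmap]; exact hFnil
      simp only [hlen, if_false]
      rw [PySem.List.pyGetD_neg_one _ _ hbne]
      rw [List.getLast?_eq_some_getLast hFnil]
      exact congrArg (fun z => [z]) (List.getLast_congr hbne hFnil hmap).symm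

-- B's per-pair Dict step is a fold of +1 updates over pvLocB
theorem pvStepB (d : PySem.Dict Int Int) (traj tl : List Int) (L : Int) :
    (let st := pvSelB (traj.zip tl) L
     if st.1 ≠ [] then st.1.reverse.foldl (fun d x => d.modify x 0 (· + 1)) d
     else match st.2 with
          | some loc => d.modify loc 0 (· + 1)
          | none => d)
    = (pvLocB traj tl L).foldl (fun d x => d.modify x 0 (· + 1)) d := by
  unfold pvLocB
  cases hst : pvSelB (traj.zip tl) L with
  | mk m fb =>
    by_cases hm : m ≠ []
    · simp [hm]
    · cases fb <;> simp [hm]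

-- ===== VERDICT (by name: the statement is the Claim_ definition above) =====
theorem compute_global_counts_from_time_label_spec : Claim_equal_compute_global_counts_from_time_label := by
  intro trajs tlts L _ hpre
  unfold Spec_compute_global_counts_from_time_label
  unfold compute_global_counts_from_time_label compute_global_counts_from_time_label_alt
  simp only [pvStepB]
  rw [PySem.List.foldl_append_eq_flatMap, List.nil_append, PySem.Dict.counter_eq_foldl,
      List.foldl_flatMap]
  congr 1
  apply PySem.List.foldl_congr_mem
  intro acc p hp
  rw [pvLoc_eq p.1 p.2 L (hpre.2 p hp)]
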